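-- pv_equiv track=rewrite | github.com/sh1doy/AntBook | sec3_2/HugeNapSac.py | solve
-- ===== SOURCE A (Python) =====
-- from bisect import bisect_right
--
-- def solve(n,w,v,W):
-- 	res = -1
-- 	data = [(w[i],v[i]) for i in range(n)]
-- 	kireme = n//2
-- 	A = data[:kireme]
-- 	B = data[kireme:]
-- 	genA = [list(map(int,list(format(i,"0"+str(kireme)+"b")))) for i in range(pow(2,kireme))]
-- 	genB = [list(map(int,list(format(i,"0"+str(n-kireme)+"b")))) for i in range(pow(2,n-kireme))]
-- 	AA = [(sum([A[j][0]*genA[i][j] for j in range(kireme)]),sum([A[j][1]*genA[i][j] for j in range(kireme)])) for i in range(pow(2,kireme))]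
-- 	BB = [(sum([B[j][0]*genB[i][j] for j in range(n-kireme)]),sum([B[j][1]*genB[i][j] for j in range(n-kireme)])) for i in range(pow(2,n-kireme))]
-- 	AA.sort()
-- 	BB.sort()
-- 	BBw = [x[0] for x in BB]
-- 	BBv = [x[1] for x in BB]
-- 	BBmaxv=BBv[:]
-- 	for i in range(1,len(BBmaxv)):
-- 		BBmaxv[i] = max(BBmaxv[i],BBmaxv[i-1])
--
-- 	for aitem in AA:
-- 		if aitem[0]<=W:
-- 			hi = bisect_right(BBw,W-aitem[0])
-- 			if hi-1>=0:
-- 				t = BBmaxv[hi-1]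
-- 			else:
-- 				t =0
-- 			res = max(res,t+aitem[1])
-- 	return(res)
-- ===== SOURCE B (Python) =====
-- def solve(n, w, v, W):
--     items = list(zip(w[:n], v[:n]))
--     half = n // 2
--
--     def subsets(its):
--         acc = [(0, 0)]
--         for wi, vi in its:
--             acc = acc + [(sw + wi, sv + vi) for (sw, sv) in acc]
--         return acc
--
--     AA = subsets(items[:half])
--     BB = subsets(items[half:])
--     AA.sort(key=lambda t: t[0], reverse=True)   # weight descending: budgets only grow
--     BB.sort(key=lambda t: t[0])                 # weight ascending
--     res = -1
--     best = None       # running max value among B-subsets already admitted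
--     j = 0
--     for aw, av in AA:
--         budget = W - aw
--         while j < len(BB) and BB[j][0] <= budget:
--             bv = BB[j][1]
--             best = bv if best is None or bv > best else best
--             j += 1
--         if aw <= W:
--             res = max(res, best + av)
--     return res
-- ===== Notes on version B (the rewrite author's own statement) =====
-- stated objective: alternative
-- what changed: B keeps the meet-in-the-middle split but enumerates each half's subset sums by fold-doubling (no binary-string formatting of bitmasks) and replaces A's per-A-item bisect over a precomputed prefix-max table by a single two-pointer sweep over the weight-sorted B list with a running maximum.
import Mathlib
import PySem

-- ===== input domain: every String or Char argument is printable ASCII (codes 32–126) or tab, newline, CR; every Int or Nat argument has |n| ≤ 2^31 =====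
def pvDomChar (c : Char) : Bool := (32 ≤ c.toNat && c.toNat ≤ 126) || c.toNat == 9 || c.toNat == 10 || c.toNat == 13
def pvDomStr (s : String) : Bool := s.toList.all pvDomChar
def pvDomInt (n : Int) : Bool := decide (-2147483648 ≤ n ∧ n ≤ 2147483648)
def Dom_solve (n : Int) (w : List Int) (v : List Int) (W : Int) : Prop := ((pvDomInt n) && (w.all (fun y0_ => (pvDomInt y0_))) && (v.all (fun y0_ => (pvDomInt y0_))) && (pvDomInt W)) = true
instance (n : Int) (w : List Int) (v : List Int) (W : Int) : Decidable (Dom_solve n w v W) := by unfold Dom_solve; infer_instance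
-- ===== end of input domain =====

-- B replaces A's bitmask subset enumeration by fold-doubling and A's per-item binary
-- search over a prefix-max table by a single two-pointer sweep (objective: alternative).


-- ===== PORT A =====

-- binary digits of a nonnegative int, MSB first, as ints ('format(i, "b")' then 'map(int, …)')
def natBinM (m : Nat) : List Int :=
  if m = 0 then [] else natBinM (m / 2) ++ [((m % 2 : Nat) : Int)]
decreasing_by exact Nat.div_lt_self (Nat.pos_of_ne_zero (by omega)) (by omega)

-- list(map(int, list(format(i, "0"+str(width)+"b")))) for i ≥ 0 (the only i A feeds it)
def pyFmtBin (i : Int) (width : Int) : List Int :=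
  let raw := if i ≤ 0 then [0] else natBinM i.toNat
  List.replicate (width - raw.length).toNat 0 ++ raw

-- the in-place prefix-max loop 'for i in range(1,len(l)): l[i] = max(l[i], l[i-1])'
def prefMaxGo (c : Int) : List Int → List Int
  | [] => [c]
  | y :: ys => c :: prefMaxGo (max y c) ys

def prefMaxA : List Int → List Int
  | [] => []
  | x :: xs => prefMaxGo x xs

-- pow(2, k) is written (2 : Int) ^ k.toNat: exact for k ≥ 0; Pre_solve gives 0 ≤ n
-- (Python raises for n < 0: pow(2, n//2) is a float and range() rejects it).
-- bisect_right on the sorted BBw list is PySem.List.bisectRight; indexing uses pyGetD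
-- (always in range here under Pre_solve).
def solve (n : Int) (w : List Int) (v : List Int) (W : Int) : Int :=
  let res : Int := -1
  let data := (PySem.List.pyRange 0 n 1).map (fun i => (PySem.List.pyGetD w i 0, PySem.List.pyGetD v i 0))
  let kireme := PySem.Int.floordiv n 2
  let Al := PySem.List.slice data none (some kireme)
  let Bl := PySem.List.slice data (some kireme) none
  let genA := (PySem.List.pyRange 0 ((2 : Int) ^ kireme.toNat) 1).map (fun i => pyFmtBin i kireme)
  let genB := (PySem.List.pyRange 0 ((2 : Int) ^ (n - kireme).toNat) 1).map (fun i => pyFmtBin i (n - kireme))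
  let AA0 := (PySem.List.pyRange 0 ((2 : Int) ^ kireme.toNat) 1).map (fun i =>
    ((PySem.List.pyRange 0 kireme 1).foldl (fun s j => s + (PySem.List.pyGetD Al j ((0 : Int), (0 : Int))).1 * PySem.List.pyGetD (PySem.List.pyGetD genA i []) j 0) 0,
     (PySem.List.pyRange 0 kireme 1).foldl (fun s j => s + (PySem.List.pyGetD Al j ((0 : Int), (0 : Int))).2 * PySem.List.pyGetD (PySem.List.pyGetD genA i []) j 0) 0))
  let BB0 := (PySem.List.pyRange 0 ((2 : Int) ^ (n - kireme).toNat) 1).map (fun i =>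
    ((PySem.List.pyRange 0 (n - kireme) 1).foldl (fun s j => s + (PySem.List.pyGetD Bl j ((0 : Int), (0 : Int))).1 * PySem.List.pyGetD (PySem.List.pyGetD genB i []) j 0) 0,
     (PySem.List.pyRange 0 (n - kireme) 1).foldl (fun s j => s + (PySem.List.pyGetD Bl j ((0 : Int), (0 : Int))).2 * PySem.List.pyGetD (PySem.List.pyGetD genB i []) j 0) 0))
  let AAs := PySem.List.sorted2 AA0 (·.1) (·.2)
  let BBs := PySem.List.sorted2 BB0 (·.1) (·.2)
  let BBw := BBs.map (·.1)
  let BBv := BBs.map (·.2)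
  let BBmaxv := prefMaxA BBv
  AAs.foldl (fun res aitem =>
    if aitem.1 ≤ W then
      let hi : Int := ((PySem.List.bisectRight BBw (W - aitem.1) : Nat) : Int)
      let t := if hi - 1 ≥ 0 then PySem.List.pyGetD BBmaxv (hi - 1) 0 else 0
      max res (t + aitem.2)
    else res) res

-- ===== PORT B =====

-- subsets: fold-doubling enumeration of all (weight,value) subset sums
def subsetsB (its : List (Int × Int)) : List (Int × Int) :=
  its.foldl (fun acc x => acc ++ acc.map (fun p => (p.1 + x.1, p.2 + x.2))) [((0 : Int), (0 : Int))]

-- the inner 'while j < len(BB) and BB[j][0] <= budget' pointer advance, ported as a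
-- recursion consuming the suffix BB[j:]
def sweepB (budget : Int) (best : Option Int) : List (Int × Int) → Option Int × List (Int × Int)
  | [] => (best, [])
  | p :: rs =>
    if p.1 ≤ budget then
      sweepB budget (some (match best with | none => p.2 | some y => if p.2 > y then p.2 else y)) rs
    else (best, p :: rs)

-- 'best + av' in Source B is reached only with best set (the empty subset (0,0) is always
-- admitted when aw ≤ W); the port writes it 'best.getD 0 + a.2'
def solve_alt (n : Int) (w : List Int) (v : List Int) (W : Int) : Int :=
  let items := (PySem.List.slice w none (some n)).zip (PySem.List.slice v none (some n))
  let half := PySem.Int.floordiv n 2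
  let AA := PySem.List.sorted (subsetsB (PySem.List.slice items none (some half))) (·.1) true
  let BB := PySem.List.sorted (subsetsB (PySem.List.slice items (some half) none)) (·.1)
  let st := AA.foldl (fun st a =>
      let s2 := sweepB (W - a.1) st.2.1 st.2.2
      (if a.1 ≤ W then max st.1 (s2.1.getD 0 + a.2) else st.1, s2.1, s2.2))
    ((-1 : Int), (none : Option Int), BB)
  st.1

-- ===== PRECONDITION & SPEC =====

-- exactly where the Python A returns: n < 0 makes pow(2, n//2) a float (TypeError in
-- range), n > len(w) or n > len(v) is an IndexError in the data comprehension
def Pre_solve (n : Int) (w : List Int) (v : List Int) (W : Int) : Prop :=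
  0 ≤ n ∧ n ≤ w.length ∧ n ≤ v.length
instance (n : Int) (w : List Int) (v : List Int) (W : Int) : Decidable (Pre_solve n w v W) := by unfold Pre_solve; infer_instance

def pvWitness_solve : Int × List Int × List Int × Int := (2, [1, 2], [3, 4], 2)

def Spec_solve (n : Int) (w : List Int) (v : List Int) (W : Int) (out : Int) : Prop := out = solve_alt n w v W
instance (n : Int) (w : List Int) (v : List Int) (W : Int) (out : Int) : Decidable (Spec_solve n w v W out) := by unfold Spec_solve; infer_instance

-- ===== CLAIM (what is proved, stated in full; the proofs are below) =====
def Claim_equal_solve : Prop := ∀ (n : Int) (w : List Int) (v : List Int) (W : Int), Dom_solve n w v W → Pre_solve n w v W → Spec_solve n w v W (solve n w v W)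

-- ===== LEMMAS AND PROOFS =====

-- canonical subset enumeration (A's bit order), and the canonical max-query fold
def enumS : List (Int × Int) → List (Int × Int)
  | [] => [((0 : Int), (0 : Int))]
  | x :: xs => enumS xs ++ (enumS xs).map (fun p => (p.1 + x.1, p.2 + x.2))

def qcomb (acc : Option Int) (p : Int × Int) : Option Int :=
  some (match acc with | none => p.2 | some y => max y p.2)

def qmax (bb : List (Int × Int)) (x : Int) : Option Int :=
  bb.foldl (fun acc p => if p.1 ≤ x then qcomb acc p else acc) none

def FF (W : Int) (bb : List (Int × Int)) (res : Int) (a : Int × Int) : Int :=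
  if a.1 ≤ W then max res ((qmax bb (W - a.1)).getD 0 + a.2) else res

-- exact-width MSB-first bits
def bitsM : Nat → Nat → List Int
  | 0, _ => []
  | k + 1, i => (if 2 ^ k ≤ i then (1 : Int) else 0) :: bitsM k (i % 2 ^ k)

def dotW (its : List (Int × Int)) (bs : List Int) : Int :=
  ((its.zip bs).map (fun p => p.1.1 * p.2)).sum
def dotV (its : List (Int × Int)) (bs : List Int) : Int :=
  ((its.zip bs).map (fun p => p.1.2 * p.2)).sum

lemma bitsM_zero (k : Nat) : bitsM k 0 = List.replicate k 0 := by
  induction k with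
  | zero => rfl
  | succ k ih =>
    have h : ¬ 2 ^ k ≤ 0 := Nat.not_le.mpr (Nat.two_pow_pos k)
    simp [bitsM, ih, h, List.replicate_succ]

lemma bitsM_snoc (k i : Nat) (hi : i < 2 ^ (k + 1)) :
    bitsM (k + 1) i = bitsM k (i / 2) ++ [((i % 2 : Nat) : Int)] := by
  induction k generalizing i with
  | zero =>
    simp only [bitsM]
    interval_cases i <;> simp
  | succ k ih =>
    have h2 : i % 2 ^ (k + 1) < 2 ^ (k + 1) := Nat.mod_lt _ (by positivity)
    have hd : i / 2 < 2 ^ (k + 1) := by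
      have : 2 ^ (k + 2) = 2 ^ (k + 1) * 2 := by ring
      omega
    rw [bitsM, ih _ h2, bitsM]
    have e1 : (i % 2 ^ (k + 1)) / 2 = (i / 2) % 2 ^ k := by
      have : 2 ^ (k + 1) = 2 * 2 ^ k := by ring
      rw [this, Nat.mod_mul_right_div_self]
    have e2 : (i % 2 ^ (k + 1)) % 2 = i % 2 := Nat.mod_mod_of_dvd _ ⟨2 ^ k, by ring⟩
    have hp : 2 ^ (k + 1) = 2 ^ k * 2 := by ring
    simp only [e1, e2, List.cons_append]
    congr 1
    split_ifs with h1 h2 <;> first | rfl | omega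

lemma length_natBinM_le (k i : Nat) (hi : i < 2 ^ k) : (natBinM i).length ≤ k := by
  induction k generalizing i with
  | zero => rw [natBinM]; simp at hi; simp [hi]
  | succ k ih =>
    by_cases h0 : i = 0
    · rw [natBinM]; simp [h0]
    · rw [natBinM, if_neg h0]
      have : i / 2 < 2 ^ k := by
        have : 2 ^ (k + 1) = 2 ^ k * 2 := by ring
        omega
      have := ih _ this
      simp; omega

lemma natBinM_zero : natBinM 0 = [] := by rw [natBinM]; simp

lemma natBinM_one : natBinM 1 = [1] := by
  rw [natBinM]; norm_num [natBinM_zero]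

lemma pyFmtBin_eq_bitsM (k i : Nat) (hk : 1 ≤ k) (hi : i < 2 ^ k) :
    pyFmtBin (i : Int) (k : Int) = bitsM k i := by
  induction k generalizing i with
  | zero => omega
  | succ k ih =>
    by_cases h0 : i = 0
    · subst h0
      simp only [pyFmtBin, bitsM_zero]
      rw [if_pos (by norm_num)]
      simp only [List.length_singleton]
      have hrep : ∀ (m : Nat), List.replicate m (0:Int) ++ [0] = List.replicate (m+1) 0 :=
        fun m => (List.replicate_succ' ..).symm
      rw [hrep]
      congr 1
      omega
    · by_cases hk1 : k = 0
      · subst hk1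
        have : i = 1 := by omega
        subst this
        simp only [pyFmtBin, bitsM]
        norm_num [natBinM_one, bitsM_zero]
      · -- k ≥ 1, i ≥ 1
        have hd : i / 2 < 2 ^ k := by
          have : 2 ^ (k + 1) = 2 ^ k * 2 := by ring
          omega
        rw [bitsM_snoc _ _ hi]
        by_cases hd0 : i / 2 = 0
        · -- i = 1
          have : i = 1 := by omega
          subst this
          rw [hd0, bitsM_zero]
          simp only [pyFmtBin]
          rw [if_neg (by norm_num)]
          norm_num [natBinM_one]
        · have ihh := ih (i / 2) (by omega) hd
          rw [← ihh]
          simp only [pyFmtBin]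
          rw [if_neg (by omega), if_neg (by omega)]
          have hnb : natBinM i = natBinM (i / 2) ++ [((i % 2 : Nat) : Int)] := by
            rw [natBinM, if_neg h0]
          simp only [Int.toNat_natCast]
          rw [hnb]
          simp only [List.length_append, List.length_singleton]
          rw [← List.append_assoc]
          have hlen : (natBinM (i / 2)).length ≤ k := length_natBinM_le k _ hd
          congr 3
          omega

lemma length_bitsM (k i : Nat) : (bitsM k i).length = k := by
  induction k generalizing i with
  | zero => rfl
  | succ k ih => simp [bitsM, ih]

lemma dot_sum (its : List (Int × Int)) (bs : List Int) (kn : Nat)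
    (h1 : its.length = kn) (h2 : bs.length = kn) :
    ((List.range kn).map (fun u => (its.getD u (0, 0)).1 * bs.getD u 0)).sum = dotW its bs ∧
    ((List.range kn).map (fun u => (its.getD u (0, 0)).2 * bs.getD u 0)).sum = dotV its bs := by
  induction its generalizing bs kn with
  | nil => subst h1; simp [dotW, dotV]
  | cons it its ih =>
    subst h1
    rcases bs with _ | ⟨b, bs'⟩
    · simp at h2
    · simp only [List.length_cons, Nat.succ_inj] at h2
      rw [List.length_cons, List.range_succ_eq_map]
      simp only [List.map_cons, List.map_map, List.sum_cons, Function.comp_def,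
        List.getD_cons_zero, List.getD_cons_succ]
      have := ih bs' its.length rfl h2
      simp only [dotW, dotV, List.zip_cons_cons, List.map_cons, List.sum_cons] at *
      exact ⟨by rw [this.1], by rw [this.2]⟩

lemma enumA_core (its : List (Int × Int)) :
    (List.range (2 ^ its.length)).map
      (fun i => (dotW its (bitsM its.length i), dotV its (bitsM its.length i))) = enumS its := by
  induction its with
  | nil => simp [enumS, dotW, dotV, bitsM]
  | cons x xs ih =>
    simp only [List.length_cons, enumS]
    rw [pow_succ, Nat.mul_two, List.range_add, List.map_append, List.map_map]
    congr 1
    · rw [← ih]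
      apply List.map_congr_left
      intro i hi
      rw [List.mem_range] at hi
      have hb : bitsM (xs.length + 1) i = 0 :: bitsM xs.length i := by
        rw [bitsM, if_neg (by omega), Nat.mod_eq_of_lt hi]
      rw [hb]
      simp only [dotW, dotV, List.zip_cons_cons, List.map_cons, List.sum_cons, mul_zero, zero_add]
    · rw [← ih, List.map_map]
      apply List.map_congr_left
      intro i hi
      rw [List.mem_range] at hi
      have hb : bitsM (xs.length + 1) (2 ^ xs.length + i) = 1 :: bitsM xs.length i := by
        rw [bitsM, if_pos (by omega), Nat.add_mod_left, Nat.mod_eq_of_lt hi]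
      simp only [Function.comp_def, hb]
      simp only [dotW, dotV, List.zip_cons_cons, List.map_cons, List.sum_cons, mul_one,
        Prod.mk.injEq]
      constructor <;> ring

lemma mem_enumS_zero (its : List (Int × Int)) : ((0 : Int), (0 : Int)) ∈ enumS its := by
  induction its with
  | nil => simp [enumS]
  | cons x xs ih => simp only [enumS, List.mem_append]; exact Or.inl ih

-- the port's AA/BB comprehension equals enumS
lemma portEnum (its : List (Int × Int)) (kn : Nat) (h : its.length = kn) :
    (PySem.List.pyRange 0 ((2 : Int) ^ kn) 1).map (fun i =>
      ((PySem.List.pyRange 0 (kn : Int) 1).foldl (fun s j => s + (PySem.List.pyGetD its j ((0 : Int), (0 : Int))).1 * PySem.List.pyGetD (PySem.List.pyGetD ((PySem.List.pyRange 0 ((2 : Int) ^ kn) 1).map (fun i2 => pyFmtBin i2 (kn : Int))) i []) j 0) 0,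
       (PySem.List.pyRange 0 (kn : Int) 1).foldl (fun s j => s + (PySem.List.pyGetD its j ((0 : Int), (0 : Int))).2 * PySem.List.pyGetD (PySem.List.pyGetD ((PySem.List.pyRange 0 ((2 : Int) ^ kn) 1).map (fun i2 => pyFmtBin i2 (kn : Int))) i []) j 0) 0)) = enumS its := by
  subst h
  rcases Nat.eq_zero_or_pos its.length with hz | hpos
  · rw [List.length_eq_zero_iff] at hz; subst hz
    norm_num [PySem.List.pyRange_one, enumS]
  · have hcast : ((2 : Int) ^ its.length) = ((2 ^ its.length : Nat) : Int) := by push_cast; ring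
    have hL : (PySem.List.pyRange 0 ((2 : Int) ^ its.length) 1).map
        (fun i => (dotW its (bitsM its.length i.toNat), dotV its (bitsM its.length i.toNat))) = enumS its := by
      rw [hcast, PySem.List.pyRange_one, List.map_map, ← enumA_core its]
      simp only [Function.comp_def, Int.sub_zero, Int.toNat_natCast, zero_add]
    rw [← hL]
    apply List.map_congr_left
    intro i hi
    rw [PySem.List.mem_pyRange_one] at hi
    obtain ⟨hi0, hiU⟩ := hi
    have hiN : i.toNat < 2 ^ its.length := by rw [hcast] at hiU; omega
    rw [PySem.List.pyGetD_map_pyRange_of_nonneg (fun i2 => pyFmtBin i2 (its.length : Int)) ((2 : Int) ^ its.length) i [] hi0 hiU]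
    rw [show i = ((i.toNat : Nat) : Int) from (Int.toNat_of_nonneg hi0).symm]
    rw [pyFmtBin_eq_bitsM its.length i.toNat hpos hiN]
    rw [PySem.List.foldl_add, PySem.List.foldl_add, PySem.List.pyRange_one (0 : Int) (its.length : Int)]
    simp only [zero_add, List.map_map, Function.comp_def, PySem.List.pyGetD_natCast,
      Int.toNat_natCast, Int.sub_zero]
    have hd := dot_sum its (bitsM its.length i.toNat) its.length rfl (length_bitsM _ _)
    rw [hd.1, hd.2]

-- sorted2 with fst/snd keys is sorted under the lexicographic order; its weights are nondecreasing
lemma sorted2_eq_sorted_lex (xs : List (Int × Int)) :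
    PySem.List.sorted2 xs (·.1) (·.2) = PySem.List.sorted xs (fun p => (toLex p : Lex (Int × Int))) := by
  have hbf : (fun (a b : Int × Int) => decide (a.1 < b.1) || (!decide (b.1 < a.1) && decide (a.2 < b.2)))
      = (fun (a b : Int × Int) => decide ((toLex a : Lex (Int × Int)) < toLex b)) := by
    funext a b
    have hlex : ((toLex a : Lex (Int × Int)) < toLex b) ↔
        (a.1 < b.1 ∨ (a.1 = b.1 ∧ a.2 < b.2)) := Prod.Lex.lt_iff
    by_cases h1 : a.1 < b.1 <;> by_cases h2 : b.1 < a.1 <;> by_cases h3 : a.2 < b.2 <;>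
      simp [h1, h2, h3, hlex] <;> omega
  simp only [PySem.List.sorted2, PySem.List.sorted, Bool.false_eq_true, if_false]
  rw [hbf]

lemma sorted2_pairwise_fst (xs : List (Int × Int)) :
    (PySem.List.sorted2 xs (·.1) (·.2)).Pairwise (fun p q => p.1 ≤ q.1) := by
  rw [sorted2_eq_sorted_lex]
  have h := PySem.List.sorted_pairwise (κ := Lex (Int × Int)) xs (fun p => toLex p)
  refine h.imp ?_
  intro p q hpq
  rw [Prod.Lex.le_iff] at hpq
  rcases hpq with h' | ⟨h', _⟩
  · exact le_of_lt h'
  · exact le_of_eq h'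

lemma qcomb_some_foldl (y : Int) (l : List (Int × Int)) :
    l.foldl qcomb (some y) = some ((l.map (·.2)).foldl max y) := by
  induction l generalizing y with
  | nil => rfl
  | cons p l ih => simp only [List.foldl_cons, List.map_cons, qcomb]; exact ih (max y p.2)

lemma qmax_eq_filter (bb : List (Int × Int)) (x : Int) :
    qmax bb x = (bb.filter (fun p => decide (p.1 ≤ x))).foldl qcomb none := by
  unfold qmax
  rw [PySem.List.foldl_ite_eq_foldl_filter (fun p => p.1 ≤ x) qcomb bb none]

lemma qmax_perm (bb1 bb2 : List (Int × Int)) (h : bb1.Perm bb2) (x : Int) :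
    qmax bb1 x = qmax bb2 x := by
  unfold qmax
  refine @List.Perm.foldl_eq _ _ _ _ _ ⟨?_⟩ h none
  intro acc a b
  by_cases h1 : a.1 ≤ x <;> by_cases h2 : b.1 ≤ x <;>
    rcases acc with _ | y <;>
      simp [h1, h2, qcomb, max_comm, max_left_comm]

lemma prefMaxGo_getD (l : List Int) (c : Int) (h : Nat) (hh : h ≤ l.length) :
    (prefMaxGo c l).getD h 0 = (l.take h).foldl max c := by
  induction l generalizing c h with
  | nil =>
    simp only [List.length_nil, Nat.le_zero] at hh
    subst hh; rfl
  | cons y ys ih =>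
    rcases h with _ | h
    · rfl
    · simp only [prefMaxGo, List.getD_cons_succ, List.take_succ_cons, List.foldl_cons]
      rw [max_comm c y]
      exact ih _ h (by simp at hh; omega)

lemma filter_eq_take_of_cut (l : List (Int × Int)) (x : Int) (t : Nat) (ht : t ≤ l.length)
    (h1 : ∀ (j : Nat) (hj : j < l.length), j < t → l[j].1 ≤ x)
    (h2 : ∀ (j : Nat) (hj : j < l.length), t ≤ j → ¬ l[j].1 ≤ x) :
    l.filter (fun p => decide (p.1 ≤ x)) = l.take t := by
  induction l generalizing t with
  | nil => simp
  | cons p l ih =>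
    rcases t with _ | s
    · have hp := h2 0 (by simp) (Nat.zero_le _)
      simp only [List.getElem_cons_zero] at hp
      rw [List.take_zero, List.filter_cons, if_neg (by simpa using hp)]
      exact ih 0 (Nat.zero_le _) (fun j hj hlt => absurd hlt (Nat.not_lt_zero j))
        (fun j hj _ => by
          have := h2 (j + 1) (by simpa using Nat.succ_lt_succ hj) (Nat.zero_le _)
          simp only [List.getElem_cons_succ] at this
          exact this)
    · have hp := h1 0 (by simp) (Nat.succ_pos _)
      simp only [List.getElem_cons_zero] at hp
      rw [List.take_succ_cons, List.filter_cons, if_pos (by simpa using hp)]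
      congr 1
      exact ih s (by simpa using ht)
        (fun j hj hjt => by
          have := h1 (j + 1) (by simpa using Nat.succ_lt_succ hj) (Nat.succ_lt_succ hjt)
          simpa using this)
        (fun j hj hjt => by
          have := h2 (j + 1) (by simpa using Nat.succ_lt_succ hj) (Nat.succ_le_succ hjt)
          simpa using this)

-- A's bisect + prefix-max lookup computes the canonical query
lemma Aquery (bb : List (Int × Int)) (hp : bb.Pairwise (fun p q => p.1 ≤ q.1)) (x : Int)
    (hmem : ∃ p ∈ bb, p.1 ≤ x) :
    (if ((PySem.List.bisectRight (bb.map (·.1)) x : Nat) : Int) - 1 ≥ 0 then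
        PySem.List.pyGetD (prefMaxA (bb.map (·.2))) (((PySem.List.bisectRight (bb.map (·.1)) x : Nat) : Int) - 1) 0
      else 0) = (qmax bb x).getD 0 := by
  have hpw : (bb.map (·.1)).Pairwise (· ≤ ·) := by
    rw [List.pairwise_map]; exact hp
  obtain ⟨hle, hlt, hgt⟩ := PySem.List.bisectRight_spec (bb.map (·.1)) x hpw
  set hi := PySem.List.bisectRight (bb.map (·.1)) x with hhi
  obtain ⟨p0, hp0mem, hp0le⟩ := hmem
  obtain ⟨j0, hj0, hj0e⟩ := List.mem_iff_getElem.mp hp0mem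
  have hlenm : (bb.map (·.1)).length = bb.length := List.length_map ..
  have hj1 : 1 ≤ hi := by
    by_contra hcon
    have := hgt j0 (by omega) (by omega)
    rw [List.getElem_map, hj0e] at this
    omega
  rw [if_pos (by omega)]
  have hcast : ((hi : Nat) : Int) - 1 = ((hi - 1 : Nat) : Int) := by omega
  rw [hcast, PySem.List.pyGetD_natCast]
  rcases bb with _ | ⟨q0, rest⟩
  · simp at hp0mem
  · obtain ⟨m, hm⟩ : ∃ m, hi = m + 1 := ⟨hi - 1, by omega⟩
    have hfil : (q0 :: rest).filter (fun p => decide (p.1 ≤ x)) = (q0 :: rest).take hi := by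
      refine filter_eq_take_of_cut _ x hi (by omega) ?_ ?_
      · intro j hj hjt
        have := hlt j (by omega) hjt
        rwa [List.getElem_map] at this
      · intro j hj hjt
        have := hgt j (by omega) hjt
        rw [List.getElem_map] at this
        omega
    rw [qmax_eq_filter, hfil]
    rw [show (q0 :: rest).take hi = q0 :: rest.take m by rw [hm, List.take_succ_cons]]
    rw [List.foldl_cons]
    have hq0 : qcomb none q0 = some q0.2 := rfl
    rw [hq0, qcomb_some_foldl, Option.getD_some]
    simp only [List.map_cons, prefMaxA]
    rw [prefMaxGo_getD _ _ _ (by simp at hle ⊢; omega)]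
    rw [show hi - 1 = m by omega]
    rw [List.map_take]

-- B's sweep splits the suffix at the budget
lemma sweepB_spec (budget : Int) (rest : List (Int × Int)) (best : Option Int) :
    ∃ mid rst, rest = mid ++ rst ∧
      sweepB budget best rest = (mid.foldl qcomb best, rst) ∧
      (∀ p ∈ mid, p.1 ≤ budget) ∧
      (rst = [] ∨ ∃ q qs, rst = q :: qs ∧ ¬ q.1 ≤ budget) := by
  induction rest generalizing best with
  | nil => exact ⟨[], [], rfl, rfl, by simp, Or.inl rfl⟩
  | cons p rs ih =>
    by_cases hp : p.1 ≤ budget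
    · obtain ⟨mid, rst, heq, hsw, hmid, hrst⟩ := ih (qcomb best p)
      refine ⟨p :: mid, rst, by rw [List.cons_append, heq], ?_, ?_, hrst⟩
      · have hstep : sweepB budget best (p :: rs)
            = sweepB budget (qcomb best p) rs := by
          rw [sweepB.eq_def]
          simp only [if_pos hp]
          congr 1
          rcases best with _ | y
          · rfl
          · simp only [qcomb]
            congr 1
            split_ifs <;> omega
        rw [hstep, hsw, List.foldl_cons]
      · intro q hq
        rcases List.mem_cons.mp hq with rfl | hq'
        · exact hp
        · exact hmid q hq'
    · exact ⟨[], p :: rs, rfl, by rw [sweepB.eq_def]; simp only []; rw [if_neg hp]; rfl, by simp,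
        Or.inr ⟨p, rs, rfl, hp⟩⟩

lemma bloop_eq (W : Int) (bb : List (Int × Int)) (hbb : bb.Pairwise (fun p q => p.1 ≤ q.1)) :
    ∀ (aal : List (Int × Int)) (res : Int) (done rst : List (Int × Int)),
      bb = done ++ rst →
      aal.Pairwise (fun a b => b.1 ≤ a.1) →
      (∀ p ∈ done, ∀ a ∈ aal, p.1 ≤ W - a.1) →
      (aal.foldl (fun st a =>
          (if a.1 ≤ W then max st.1 ((sweepB (W - a.1) st.2.1 st.2.2).1.getD 0 + a.2) else st.1,
            (sweepB (W - a.1) st.2.1 st.2.2).1, (sweepB (W - a.1) st.2.1 st.2.2).2))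
        (res, done.foldl qcomb none, rst)).1 = aal.foldl (FF W bb) res := by
  intro aal
  induction aal with
  | nil => intro res done rst _ _ _; rfl
  | cons a as ih =>
    intro res done rst hsplit haa hdone
    obtain ⟨mid, rst2, heq2, hsw, hmid, hrst2⟩ := sweepB_spec (W - a.1) rst (done.foldl qcomb none)
    rw [List.pairwise_cons] at haa
    have hbb2 : bb = (done ++ mid) ++ rst2 := by
      rw [hsplit, heq2, List.append_assoc]
    have hbest2 : mid.foldl qcomb (done.foldl qcomb none) = (done ++ mid).foldl qcomb none :=
      (List.foldl_append ..).symm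
    have hfail : ∀ p ∈ rst2, ¬ p.1 ≤ W - a.1 := by
      rcases hrst2 with rfl | ⟨q, qs, rfl, hq⟩
      · intro p hp; simp at hp
      · have hsuf : (q :: qs) <:+ bb := ⟨done ++ mid, by rw [hbb2]⟩
        have hpw2 : (q :: qs).Pairwise (fun p r => p.1 ≤ r.1) := hbb.sublist hsuf.sublist
        rw [List.pairwise_cons] at hpw2
        intro p hp
        rcases List.mem_cons.mp hp with rfl | hp'
        · exact hq
        · have := hpw2.1 p hp'
          omega
    have hq : qmax bb (W - a.1) = (done ++ mid).foldl qcomb none := by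
      rw [qmax_eq_filter, hbb2, List.filter_append, List.filter_append]
      rw [List.filter_eq_self.mpr (fun p hp => by
        simp only [decide_eq_true_eq]
        exact hdone p hp a (List.mem_cons_self ..)),
        List.filter_eq_self.mpr (fun p hp => by
          simp only [decide_eq_true_eq]
          exact hmid p hp),
        List.filter_eq_nil_iff.mpr (fun p hp => by
          simp only [decide_eq_true_eq]
          exact hfail p hp)]
      rw [List.append_nil]
    have hstep : (List.foldl (fun st a =>
        (if a.1 ≤ W then max st.1 ((sweepB (W - a.1) st.2.1 st.2.2).1.getD 0 + a.2) else st.1,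
          (sweepB (W - a.1) st.2.1 st.2.2).1, (sweepB (W - a.1) st.2.1 st.2.2).2))
        (res, done.foldl qcomb none, rst) (a :: as))
        = (List.foldl (fun st a =>
        (if a.1 ≤ W then max st.1 ((sweepB (W - a.1) st.2.1 st.2.2).1.getD 0 + a.2) else st.1,
          (sweepB (W - a.1) st.2.1 st.2.2).1, (sweepB (W - a.1) st.2.1 st.2.2).2))
        (FF W bb res a, (done ++ mid).foldl qcomb none, rst2) as) := by
      rw [List.foldl_cons]
      congr 1
      simp only [hsw, hbest2, FF, hq]
    rw [hstep, List.foldl_cons]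
    refine ih (FF W bb res a) (done ++ mid) rst2 hbb2 haa.2 ?_
    intro p hp a' ha'
    rcases List.mem_append.mp hp with hpd | hpm
    · exact hdone p hpd a' (List.mem_cons_of_mem _ ha')
    · have h1 := hmid p hpm
      have h2 := haa.1 a' ha'
      omega

lemma FF_rightComm (W : Int) (bb : List (Int × Int)) :
    ∀ (r : Int) (a b : Int × Int), FF W bb (FF W bb r a) b = FF W bb (FF W bb r b) a := by
  intro r a b
  unfold FF
  split_ifs <;> first | rfl | rw [max_right_comm]

lemma G_perm (x : Int × Int) {a b : List (Int × Int)} (h : a.Perm b) :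
    (a ++ a.map (fun p => (p.1 + x.1, p.2 + x.2))).Perm
      (b ++ b.map (fun p => (p.1 + x.1, p.2 + x.2))) :=
  h.append (h.map _)

lemma foldl_G_perm (l : List (Int × Int)) :
    ∀ {a b : List (Int × Int)}, a.Perm b →
      (l.foldl (fun acc x => acc ++ acc.map (fun p => (p.1 + x.1, p.2 + x.2))) a).Perm
        (l.foldl (fun acc x => acc ++ acc.map (fun p => (p.1 + x.1, p.2 + x.2))) b) := by
  induction l with
  | nil => intro a b h; exact h
  | cons x l ih => intro a b h; exact ih (G_perm x h)

lemma foldl_G_map (l : List (Int × Int)) (q : Int × Int) :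
    ∀ (a : List (Int × Int)),
      l.foldl (fun acc x => acc ++ acc.map (fun p => (p.1 + x.1, p.2 + x.2)))
          (a.map (fun p => (p.1 + q.1, p.2 + q.2)))
        = (l.foldl (fun acc x => acc ++ acc.map (fun p => (p.1 + x.1, p.2 + x.2))) a).map
            (fun p => (p.1 + q.1, p.2 + q.2)) := by
  induction l with
  | nil => intro a; rfl
  | cons x l ih =>
    intro a
    rw [List.foldl_cons, List.foldl_cons, ← ih]
    congr 1
    rw [List.map_append, List.map_map, List.map_map]
    congr 1
    apply List.map_congr_left
    intro p _
    simp only [Function.comp_apply, Prod.mk.injEq]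
    constructor <;> ring

lemma foldl_G_append (l : List (Int × Int)) :
    ∀ (a b : List (Int × Int)),
      (l.foldl (fun acc x => acc ++ acc.map (fun p => (p.1 + x.1, p.2 + x.2))) (a ++ b)).Perm
        (l.foldl (fun acc x => acc ++ acc.map (fun p => (p.1 + x.1, p.2 + x.2))) a
          ++ l.foldl (fun acc x => acc ++ acc.map (fun p => (p.1 + x.1, p.2 + x.2))) b) := by
  induction l with
  | nil => intro a b; exact List.Perm.refl _
  | cons x l ih =>
    intro a b
    rw [List.foldl_cons]
    refine ((foldl_G_perm l ?_).trans (ih _ _))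
    rw [List.map_append, ← Multiset.coe_eq_coe]
    simp only [← Multiset.coe_add]
    abel

lemma subsetsB_perm (its : List (Int × Int)) : (subsetsB its).Perm (enumS its) := by
  induction its with
  | nil => exact List.Perm.refl _
  | cons x xs ih =>
    unfold subsetsB at *
    rw [List.foldl_cons]
    have h1 : ([((0 : Int), (0 : Int))] ++ [((0 : Int) + x.1, (0 : Int) + x.2)]).Perm
        ([((0 : Int), (0 : Int))] ++ [((0 : Int), (0 : Int))].map (fun p => (p.1 + x.1, p.2 + x.2))) := by simp
    refine ((foldl_G_perm xs h1).trans ?_)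
    refine (foldl_G_append xs _ _).trans ?_
    rw [foldl_G_map]
    exact (ih.append (ih.map _)).trans (List.Perm.refl _)

-- the two item lists agree
lemma items_eq (n : Int) (w v : List Int) (h0 : 0 ≤ n) (hw : n ≤ w.length) (hv : n ≤ v.length) :
    (PySem.List.pyRange 0 n 1).map (fun i => (PySem.List.pyGetD w i 0, PySem.List.pyGetD v i 0)) =
      (PySem.List.slice w none (some n)).zip (PySem.List.slice v none (some n)) := by
  have hn : n = ((n.toNat : Nat) : Int) := (Int.toNat_of_nonneg h0).symm
  rw [hn, PySem.List.pyRange_one, PySem.List.slice_to_natCast, PySem.List.slice_to_natCast,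
    List.map_map]
  apply List.ext_getElem
  · simp
    omega
  · intro i h1 h2
    simp only [List.length_map, List.length_range] at h1
    have hiw : i < w.length := by simp at h1; omega
    have hiv : i < v.length := by simp at h1; omega
    simp only [List.getElem_map, List.getElem_range, Function.comp_apply, zero_add,
      PySem.List.pyGetD_natCast, List.getElem_zip, List.getElem_take]
    rw [List.getD_eq_getElem w 0 hiw, List.getD_eq_getElem v 0 hiv]

lemma solve_eq_canon (n : Int) (w v : List Int) (W : Int) (h0 : 0 ≤ n) (hw : n ≤ w.length) (hv : n ≤ v.length) :
    solve n w v W =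
      (PySem.List.sorted2 (enumS (((PySem.List.slice w none (some n)).zip (PySem.List.slice v none (some n))).take (n.toNat / 2))) (·.1) (·.2)).foldl
        (FF W (enumS (((PySem.List.slice w none (some n)).zip (PySem.List.slice v none (some n))).drop (n.toNat / 2)))) (-1) := by
  have hn : n = ((n.toNat : Nat) : Int) := (Int.toNat_of_nonneg h0).symm
  have hkir : PySem.Int.floordiv n 2 = ((n.toNat / 2 : Nat) : Int) := by
    rw [hn]; exact_mod_cast PySem.Int.floordiv_natCast n.toNat 2
  have hnk : n - ((n.toNat / 2 : Nat) : Int) = ((n.toNat - n.toNat / 2 : Nat) : Int) := by omega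
  have hitems := items_eq n w v h0 hw hv
  have hlen : ((PySem.List.slice w none (some n)).zip (PySem.List.slice v none (some n))).length
      = n.toNat := by
    rw [hn, PySem.List.slice_to_natCast, PySem.List.slice_to_natCast]
    simp only [List.length_zip, List.length_take]
    omega
  unfold solve
  simp only [hkir, hnk, Int.toNat_natCast, PySem.List.slice_to_natCast,
    PySem.List.slice_from_natCast, hitems]
  rw [portEnum _ (n.toNat / 2) (by rw [List.length_take, hlen]; omega),
    portEnum _ (n.toNat - n.toNat / 2) (by rw [List.length_drop, hlen])]
  apply PySem.List.foldl_congr_mem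
  intro acc a _
  by_cases hW : a.1 ≤ W
  · simp only [if_pos hW, FF]
    have hbbs := sorted2_pairwise_fst
      (enumS (((PySem.List.slice w none (some n)).zip (PySem.List.slice v none (some n))).drop (n.toNat / 2)))
    have hmem : ∃ p ∈ PySem.List.sorted2
        (enumS (((PySem.List.slice w none (some n)).zip (PySem.List.slice v none (some n))).drop (n.toNat / 2))) (·.1) (·.2),
        p.1 ≤ W - a.1 :=
      ⟨(0, 0), (PySem.List.sorted2_perm ..).mem_iff.mpr (mem_enumS_zero _), by omega⟩
    rw [Aquery _ hbbs (W - a.1) hmem,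
      qmax_perm _ _ (PySem.List.sorted2_perm ..) (W - a.1)]
  · simp only [if_neg hW, FF]

lemma solve_alt_eq_canon (n : Int) (w v : List Int) (W : Int) (h0 : 0 ≤ n) (_hw : n ≤ w.length) (_hv : n ≤ v.length) :
    solve_alt n w v W =
      (PySem.List.sorted (subsetsB (((PySem.List.slice w none (some n)).zip (PySem.List.slice v none (some n))).take (n.toNat / 2))) (·.1) true).foldl
        (FF W (enumS (((PySem.List.slice w none (some n)).zip (PySem.List.slice v none (some n))).drop (n.toNat / 2)))) (-1) := by
  have hn : n = ((n.toNat : Nat) : Int) := (Int.toNat_of_nonneg h0).symm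
  have hkir : PySem.Int.floordiv n 2 = ((n.toNat / 2 : Nat) : Int) := by
    rw [hn]; exact_mod_cast PySem.Int.floordiv_natCast n.toNat 2
  unfold solve_alt
  simp only [hkir, PySem.List.slice_to_natCast, PySem.List.slice_from_natCast]
  have hbb := PySem.List.sorted_pairwise (κ := Int)
    (subsetsB (((PySem.List.slice w none (some n)).zip (PySem.List.slice v none (some n))).drop (n.toNat / 2))) (·.1)
  have haa := PySem.List.sorted_pairwise_rev (κ := Int)
    (subsetsB (((PySem.List.slice w none (some n)).zip (PySem.List.slice v none (some n))).take (n.toNat / 2))) (·.1)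
  have hmain := bloop_eq W _ hbb
    (PySem.List.sorted (subsetsB (((PySem.List.slice w none (some n)).zip (PySem.List.slice v none (some n))).take (n.toNat / 2))) (·.1) true)
    (-1) []
    (PySem.List.sorted (subsetsB (((PySem.List.slice w none (some n)).zip (PySem.List.slice v none (some n))).drop (n.toNat / 2))) (·.1))
    rfl haa (by intro p hp; simp at hp)
  simp only [List.foldl_nil] at hmain
  rw [hmain]
  have hFF : FF W (PySem.List.sorted (subsetsB (((PySem.List.slice w none (some n)).zip (PySem.List.slice v none (some n))).drop (n.toNat / 2))) (·.1))
      = FF W (enumS (((PySem.List.slice w none (some n)).zip (PySem.List.slice v none (some n))).drop (n.toNat / 2))) := by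
    funext r a
    unfold FF
    rw [qmax_perm _ _ ((PySem.List.sorted_perm ..).trans (subsetsB_perm _)) (W - a.1)]
  rw [hFF]

-- ===== VERDICT (by name: the statement is the Claim_ definition above) =====
theorem solve_spec : Claim_equal_solve := by
  intro n w v W hdom hpre
  obtain ⟨h0, hw, hv⟩ := hpre
  unfold Spec_solve
  rw [solve_eq_canon n w v W h0 hw hv, solve_alt_eq_canon n w v W h0 hw hv]
  have hperm : (PySem.List.sorted2
      (enumS (((PySem.List.slice w none (some n)).zip (PySem.List.slice v none (some n))).take (n.toNat / 2))) (·.1) (·.2)).Perm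
      (PySem.List.sorted (subsetsB (((PySem.List.slice w none (some n)).zip (PySem.List.slice v none (some n))).take (n.toNat / 2))) (·.1) true) :=
    ((PySem.List.sorted2_perm ..).trans ((subsetsB_perm _).symm)).trans
      (PySem.List.sorted_perm ..).symm
  exact @List.Perm.foldl_eq _ _ _ _ _
    ⟨FF_rightComm W (enumS (((PySem.List.slice w none (some n)).zip (PySem.List.slice v none (some n))).drop (n.toNat / 2)))⟩
    hperm (-1)
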